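-- pv_equiv track=rewrite | github.com/Cmaber/intellireq-python | Contradictions.py | recombine_hyphenated_words
-- ===== SOURCE A (Python) =====
-- def recombine_hyphenated_words(tokens):
--     i = 0
--     while i < len(tokens) - 2:
--         if tokens[i+1] == '-' and tokens[i].isalpha() and tokens[i+2].isalpha():
--             tokens[i] = tokens[i] + tokens[i+1] + tokens[i+2]
--             del tokens[i+1:i+3]
--         else:
--             i += 1
--     return tokens
-- ===== SOURCE B (Python) =====
-- def recombine_hyphenated_words(tokens):
--     result = []
--     for c in tokens:
--         if (len(result) >= 2 and c.isalpha()
--                 and result[-1] == '-' and result[-2].isalpha()):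
--             result.pop()
--             a = result.pop()
--             result.append(a + '-' + c)
--         else:
--             result.append(c)
--     tokens[:] = result
--     return tokens
-- ===== Notes on version B (the rewrite author's own statement) =====
-- stated objective: idiomatic
-- what changed: A's forward-index while loop that looks two tokens ahead and deletes slices from the list in place is replaced by a single left-to-right pass that pushes each token onto an output stack, merging backwards with the stack's top '-' and alpha word when the incoming token is alphabetic.
import Mathlib
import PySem

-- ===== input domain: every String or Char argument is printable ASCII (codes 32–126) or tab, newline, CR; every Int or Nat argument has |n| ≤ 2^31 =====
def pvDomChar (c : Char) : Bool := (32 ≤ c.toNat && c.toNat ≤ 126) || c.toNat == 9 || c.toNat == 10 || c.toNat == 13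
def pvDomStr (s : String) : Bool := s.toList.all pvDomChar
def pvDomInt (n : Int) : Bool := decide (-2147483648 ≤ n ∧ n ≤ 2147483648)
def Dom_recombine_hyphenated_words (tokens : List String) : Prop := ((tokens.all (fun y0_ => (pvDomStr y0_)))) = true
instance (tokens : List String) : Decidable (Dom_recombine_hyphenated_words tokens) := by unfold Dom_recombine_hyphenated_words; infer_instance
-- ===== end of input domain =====

-- B replaces A's forward-index scan with in-place deletion by a single pass building an
-- output stack that merges backwards (objective: idiomatic/alternative, same O(n) value).
-- Both A and B mutate the argument list in Python; the equivalence proved here is about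
-- the RETURN value (which is the same mutated list object in both).

-- ===== PORT A =====
-- the while loop with pointer i; `del tokens[i+1:i+3]` + assignment at i becomes
-- take i ++ [merged] ++ drop (i+3); indices are guarded in range, so getD is exact
def recombine_hyphenated_words_go (L : List String) (i : Nat) : List String :=
  if _h : i + 2 < L.length then
    if (L.getD (i+1) "" == "-") && PySem.Str.strIsalpha (L.getD i "")
        && PySem.Str.strIsalpha (L.getD (i+2) "") then
      recombine_hyphenated_words_go
        (L.take i ++ [L.getD i "" ++ L.getD (i+1) "" ++ L.getD (i+2) ""] ++ L.drop (i+3)) i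
    else
      recombine_hyphenated_words_go L (i+1)
  else L
termination_by L.length - i
decreasing_by
  · simp only [List.length_append, List.length_take, List.length_drop, List.length_cons,
      List.length_nil]
    omega
  · omega

def recombine_hyphenated_words (tokens : List String) : List String :=
  recombine_hyphenated_words_go tokens 0

-- ===== PORT B =====
-- one step of B's loop body: push c, merging with the stack's top two entries if possible
def pvStepB (st : List String) (c : String) : List String :=
  match st with
  | b :: a :: rest =>
    if PySem.Str.strIsalpha c && (b == "-") && PySem.Str.strIsalpha a then
      (a ++ "-" ++ c) :: rest
    else c :: b :: a :: rest
  | _ => c :: st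

def recombine_hyphenated_words_alt (tokens : List String) : List String :=
  (tokens.foldl pvStepB []).reverse

-- ===== PRECONDITION & SPEC =====
def Spec_recombine_hyphenated_words (tokens : List String) (out : List String) : Prop := out = recombine_hyphenated_words_alt tokens
instance (tokens : List String) (out : List String) : Decidable (Spec_recombine_hyphenated_words tokens out) := by unfold Spec_recombine_hyphenated_words; infer_instance

-- ===== CLAIM (what is proved, stated in full; the proofs are below) =====
def Claim_equal_recombine_hyphenated_words : Prop := ∀ (tokens : List String), Dom_recombine_hyphenated_words tokens → Spec_recombine_hyphenated_words tokens (recombine_hyphenated_words tokens)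

-- ===== LEMMAS AND PROOFS =====

-- the merge condition, on the three strings involved (A's order of conjuncts)
def pvCond (a b c : String) : Bool :=
  (b == "-") && PySem.Str.strIsalpha a && PySem.Str.strIsalpha c

-- invariant of A's loop: no merge is possible at any position strictly below the pointer
def pvNoMergeBelow (L : List String) (i : Nat) : Prop :=
  ∀ j : Nat, j < i → j + 2 < L.length →
    pvCond (L.getD j "") (L.getD (j+1) "") (L.getD (j+2) "") = false

theorem pvStepB_cons_cons (a b : String) (rest : List String) (c : String) :
    pvStepB (b :: a :: rest) c =
      if pvCond a b c then (a ++ "-" ++ c) :: rest else c :: b :: a :: rest := by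
  rcases Bool.eq_false_or_eq_true (b == "-") with h2 | h2 <;>
    simp [pvStepB, pvCond, h2, and_comm]

theorem pvTake_succ_reverse (L : List String) (i : Nat) (h : i < L.length) :
    (L.take (i+1)).reverse = L.getD i "" :: (L.take i).reverse := by
  rw [List.take_add_one]
  simp [List.getD, h]

theorem pvDrop_cons (L : List String) (i : Nat) (h : i < L.length) :
    L.drop i = L.getD i "" :: L.drop (i+1) := by
  rw [List.drop_eq_getElem_cons h]
  simp [List.getD, List.getElem?_eq_getElem h]

-- pushing onto the processed-prefix stack never merges, thanks to the invariant
theorem pvStepB_push (L : List String) (i : Nat) (hi : i < L.length)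
    (H : pvNoMergeBelow L i) (hlen : i + 1 < L.length) :
    pvStepB ((L.take (i+1)).reverse) (L.getD (i+1) "") =
      L.getD (i+1) "" :: (L.take (i+1)).reverse := by
  rw [pvTake_succ_reverse L i hi]
  cases i with
  | zero => simp [pvStepB]
  | succ k =>
    rw [pvTake_succ_reverse L k (by omega)]
    rw [pvStepB_cons_cons]
    rw [H k (by omega) (by omega)]
    simp

theorem pvMerged_not_alpha (a c : String) :
    PySem.Str.strIsalpha (a ++ "-" ++ c) = false := by
  have hmem : '-' ∈ (a ++ "-" ++ c).toList := by
    simp [String.toList_append]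
  have hall : (a ++ "-" ++ c).toList.all PySem.Chars.isalpha = false :=
    List.all_eq_false.mpr ⟨'-', hmem, by decide⟩
  rw [PySem.Str.strIsalpha_eq]
  unfold PySem.Chars.strIsalpha
  rw [hall, Bool.and_false]

theorem pvMerged_ne_dash (a c : String) (ha : PySem.Str.strIsalpha a = true)
    (hc : PySem.Str.strIsalpha c = true) :
    ((a ++ "-" ++ c) == "-") = false := by
  simp only [PySem.Str.strIsalpha_eq, PySem.Chars.strIsalpha, Bool.and_eq_true] at ha hc
  rw [beq_eq_false_iff_ne]
  intro h
  have hl : (a ++ "-" ++ c).toList = ("-" : String).toList := by rw [h]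
  simp only [String.toList_append] at hl
  have hlen := congrArg List.length hl
  simp only [List.length_append] at hlen
  have ha' : a.toList ≠ [] := by simpa using ha.1
  have hc' : c.toList ≠ [] := by simpa using hc.1
  have hA : 0 < a.toList.length := List.length_pos_iff.mpr ha'
  have hC : 0 < c.toList.length := List.length_pos_iff.mpr hc'
  have h1 : ("-" : String).toList.length = 1 := by decide
  omega

theorem pvCond_merged_right (x y a c : String) :
    pvCond x y (a ++ "-" ++ c) = false := by
  unfold pvCond
  rw [pvMerged_not_alpha a c]
  simp

theorem pvCond_merged_mid (x a c z : String) (ha : PySem.Str.strIsalpha a = true)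
    (hc : PySem.Str.strIsalpha c = true) :
    pvCond x (a ++ "-" ++ c) z = false := by
  unfold pvCond
  rw [pvMerged_ne_dash a c ha hc]
  simp

theorem pvTake_succ_append (L : List String) (n : Nat) (h : n < L.length) :
    L.take (n+1) = L.take n ++ [L.getD n ""] := by
  rw [List.take_add_one]
  simp [List.getElem?_eq_getElem h, List.getD]

-- the main simulation: A's loop from state (L, i) computes what B's fold computes
-- from the stack holding the first i+1 tokens (reversed) and the remaining tokens
theorem pvGo_stack (L : List String) (i : Nat) :
    pvNoMergeBelow L i →
    recombine_hyphenated_words_go L i =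
      (List.foldl pvStepB ((L.take (i+1)).reverse) (L.drop (i+1))).reverse := by
  induction L, i using recombine_hyphenated_words_go.induct with
  | case1 L i h hg ih =>
    intro H
    -- names for the three tokens
    set gi := L.getD i "" with hgi
    set g1 := L.getD (i+1) "" with hg1
    set g2 := L.getD (i+2) "" with hg2
    have hgcond : pvCond gi g1 g2 = true := by unfold pvCond; exact hg
    have hdash : g1 = "-" := by
      have := hgcond; simp only [pvCond, Bool.and_eq_true, beq_iff_eq] at this
      exact this.1.1
    have hαa : PySem.Str.strIsalpha gi = true := by
      have := hgcond; simp only [pvCond, Bool.and_eq_true] at this; exact this.1.2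
    have hαc : PySem.Str.strIsalpha g2 = true := by
      have := hgcond; simp only [pvCond, Bool.and_eq_true] at this; exact this.2
    rw [recombine_hyphenated_words_go, dif_pos h, if_pos hg]
    set m := gi ++ g1 ++ g2 with hm
    have hm' : m = gi ++ "-" ++ g2 := by rw [hm, hdash]
    set L' := L.take i ++ [m] ++ L.drop (i+3) with hL'
    have htklen : (L.take i).length = i := by simp; omega
    -- element access in L'
    have hgetlt : ∀ j, j < i → L'.getD j "" = L.getD j "" := by
      intro j hj
      rw [hL', List.append_assoc]
      rw [List.getD, List.getD, List.getElem?_append_left (by omega),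
        List.getElem?_take]
      simp [hj]
    have hgeti : L'.getD i "" = m := by
      rw [hL', List.append_assoc, List.getD, List.getElem?_append_right (by omega)]
      simp [htklen]
    -- the invariant holds for the new list
    have H' : pvNoMergeBelow L' i := by
      intro j hj hjlen
      rcases Nat.lt_or_ge (j+2) i with hc3 | hc3
      · rw [hgetlt j (by omega), hgetlt (j+1) (by omega), hgetlt (j+2) (by omega)]
        exact H j hj (by
          rw [hL'] at hjlen
          simp only [List.length_append, List.length_take, List.length_cons,
            List.length_nil, List.length_drop] at hjlen
          omega)
      · rcases Nat.eq_or_lt_of_le hc3 with hc4 | hc4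
        · -- j + 2 = i : the merged token is the rightmost of the triple, not alpha
          have e : L'.getD (j+2) "" = m := by rw [← hc4]; exact hgeti
          rw [e, hm']
          exact pvCond_merged_right _ _ gi g2
        · -- j + 2 = i + 1 : the merged token is the middle of the triple, not "-"
          have e : L'.getD (j+1) "" = m := by
            have hj1 : j + 1 = i := by omega
            rw [hj1]; exact hgeti
          rw [e, hm']
          exact pvCond_merged_mid _ gi g2 _ hαa hαc
    -- shape of L' around the pointer
    have htk' : (L'.take (i+1)).reverse = m :: (L.take i).reverse := by
      rw [hL', List.append_assoc, List.take_append]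
      rw [List.take_of_length_le (by omega), htklen]
      simp
    have hdp' : L'.drop (i+1) = L.drop (i+3) := by
      rw [hL', List.append_assoc, List.drop_append]
      rw [List.drop_eq_nil_of_le (by omega), htklen]
      simp
    -- B's fold takes two steps: push "-", then merge
    have hrest : L.drop (i+1) = g1 :: g2 :: L.drop (i+3) := by
      rw [pvDrop_cons L (i+1) (by omega), pvDrop_cons L (i+2) (by omega)]
    have hstep1 : pvStepB ((L.take (i+1)).reverse) g1 = g1 :: (L.take (i+1)).reverse :=
      pvStepB_push L i (by omega) H (by omega)
    have hstep2 : pvStepB (g1 :: (L.take (i+1)).reverse) g2 = m :: (L.take i).reverse := by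
      rw [pvTake_succ_reverse L i (by omega)]
      rw [pvStepB_cons_cons, if_pos hgcond, hm']
    rw [ih H', htk', hdp', hrest]
    simp only [List.foldl_cons]
    rw [hstep1, hstep2]
  | case2 L i h hg ih =>
    intro H
    rw [recombine_hyphenated_words_go, dif_pos h, if_neg hg]
    have hgf : ((L.getD (i+1) "" == "-") && PySem.Str.strIsalpha (L.getD i "")
        && PySem.Str.strIsalpha (L.getD (i+2) "")) = false := by
      revert hg
      cases ((L.getD (i+1) "" == "-") && PySem.Str.strIsalpha (L.getD i "")
        && PySem.Str.strIsalpha (L.getD (i+2) "")) <;> simp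
    have H' : pvNoMergeBelow L (i+1) := by
      intro j hj hjlen
      rcases Nat.lt_or_ge j i with hji | hji
      · exact H j hji hjlen
      · have : j = i := by omega
        subst this
        unfold pvCond
        exact hgf
    rw [ih H']
    have hrest : L.drop (i+1) = L.getD (i+1) "" :: L.drop (i+2) :=
      pvDrop_cons L (i+1) (by omega)
    rw [hrest]
    simp only [List.foldl_cons]
    rw [pvStepB_push L i (by omega) H (by omega)]
    rw [pvTake_succ_reverse L (i+1) (by omega)]
  | case3 L i h =>
    intro H
    rw [recombine_hyphenated_words_go, dif_neg h]
    rcases Nat.lt_or_ge (i+1) L.length with hlt | hge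
    · -- exactly one token remains: it is pushed, completing the list
      have hi : i < L.length := by omega
      have hrest : L.drop (i+1) = [L.getD (i+1) ""] := by
        rw [pvDrop_cons L (i+1) hlt, List.drop_eq_nil_of_le (by omega)]
      rw [hrest]
      simp only [List.foldl_cons, List.foldl_nil]
      rw [pvStepB_push L i hi H hlt]
      simp only [List.reverse_cons, List.reverse_reverse]
      rw [← pvTake_succ_append L (i+1) hlt]
      exact (List.take_of_length_le (by omega)).symm
    · rw [List.drop_eq_nil_of_le hge]
      simp only [List.foldl_nil, List.reverse_reverse]
      exact (List.take_of_length_le (by omega)).symm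

-- ===== VERDICT (by name: the statement is the Claim_ definition above) =====
theorem recombine_hyphenated_words_spec : Claim_equal_recombine_hyphenated_words := by
  intro tokens _
  unfold Spec_recombine_hyphenated_words recombine_hyphenated_words
    recombine_hyphenated_words_alt
  have h0 : pvNoMergeBelow tokens 0 := by intro j hj _; omega
  rw [pvGo_stack tokens 0 h0]
  cases tokens with
  | nil => simp
  | cons x t => simp [pvStepB]
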